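-- pv_equiv track=rewrite | github.com/memory-eight-way/memory | quiz/make-quiz.py | proc_line_mask_long_word
-- ===== SOURCE A (Python) =====
-- MASK_CHAR="_"
--
-- def make_len_dict(line):
--     w_words=line.split(" ")
--     di_len=dict()
--     for wele in w_words:
--         wlen=len(wele)
--         if wlen not in di_len:
--             di_len[wlen]=0
--         di_len[wlen]=di_len[wlen]+1
--     return di_len
--
-- def proc_line_mask_long_word(line,lv,slv):
--     di_len=make_len_dict(line)
--     wlenkeys=di_len.keys()
--     wlenkeys=sorted(wlenkeys,reverse=True)
--     wwordcounter=0
--     w_del_count=lv-slv+1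
--     w_del_len=0
--     for wchklen in wlenkeys:
--         wwordcounter=wwordcounter+di_len[wchklen]
--         if wwordcounter>w_del_count:
--             w_del_len=wchklen
--             break
--     ##if w_del_len==0:
--     #    return ""
--     w_words=line.split(" ")
--     w_ret=list()
--     for w_word in w_words:
--         if len(w_word)>=w_del_len:
--             w_ret.append(MASK_CHAR*len(w_word))
--         else:
--             w_ret.append(w_word)
--     wretstr= " ".join(w_ret)
--     return wretstr
-- ===== SOURCE B (Python) =====
-- MASK_CHAR = "_"
--
-- def proc_line_mask_long_word(line, lv, slv):
--     words = line.split(" ")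
--     lens = sorted((len(w) for w in words), reverse=True)
--     pos = lv - slv + 1
--     if pos < 0:
--         pos = 0
--     w_del_len = lens[pos] if pos < len(lens) else 0
--     return " ".join(MASK_CHAR * len(w) if len(w) >= w_del_len else w
--                     for w in words)
-- ===== Notes on version B (the rewrite author's own statement) =====
-- stated objective: alternative
-- what changed: B drops A's word-length counting dict and its cumulative-count loop over sorted distinct lengths, and instead picks the masking threshold by direct positional indexing into the descending sorted list of all word lengths; the masking pass is unchanged.
import Mathlib
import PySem

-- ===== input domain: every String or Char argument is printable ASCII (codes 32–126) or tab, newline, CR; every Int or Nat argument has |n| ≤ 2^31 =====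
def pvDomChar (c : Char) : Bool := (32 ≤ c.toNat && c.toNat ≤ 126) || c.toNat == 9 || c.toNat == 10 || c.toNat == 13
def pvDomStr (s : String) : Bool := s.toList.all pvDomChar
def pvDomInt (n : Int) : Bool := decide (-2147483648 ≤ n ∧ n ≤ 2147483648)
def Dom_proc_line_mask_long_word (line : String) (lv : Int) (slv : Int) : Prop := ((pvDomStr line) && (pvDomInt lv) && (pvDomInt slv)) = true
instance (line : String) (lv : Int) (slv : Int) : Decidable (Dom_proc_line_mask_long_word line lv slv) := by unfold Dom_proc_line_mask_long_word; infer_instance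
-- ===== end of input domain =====

-- B replaces A's length-count dict + sorted-distinct-keys cumulative loop by direct indexing into the
-- descending sorted list of word lengths (alternative decomposition; the masking pass is unchanged).

def MASK_CHAR : String := "_"

-- ===== PORT A =====
-- the body of A's counting loop (di_len[wlen] bookkeeping), named so the proofs can speak about it
def maskStepA (di_len : PySem.Dict Int Int) (w_del_count : Int)
    (st : Int × Int × Bool) (wchklen : Int) : Int × Int × Bool :=
  if st.2.2 then st          -- models Python's `break`: once broken, later keys are not visited
  else
    let wwordcounter := st.1 + di_len.getD wchklen 0
    if wwordcounter > w_del_count then (wwordcounter, wchklen, true)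
    else (wwordcounter, st.2.1, false)

def make_len_dict (line : String) : PySem.Dict Int Int :=
  (PySem.Chars.splitOn line.toList " ".toList).foldl
    (fun di_len wele =>
      let wlen := PySem.Chars.len wele
      let di_len := if di_len.contains wlen = false then di_len.insert wlen 0 else di_len
      di_len.insert wlen (di_len.getD wlen 0 + 1))
    PySem.Dict.empty

def proc_line_mask_long_word (line : String) (lv : Int) (slv : Int) : String :=
  let di_len := make_len_dict line
  let wlenkeys := PySem.List.sorted di_len.keys (fun x => x) true
  let w_del_count := lv - slv + 1
  let w_del_len := (wlenkeys.foldl (maskStepA di_len w_del_count) ((0 : Int), (0 : Int), false)).2.1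
  let w_words := PySem.Chars.splitOn line.toList " ".toList
  let w_ret := w_words.foldl
    (fun w_ret w_word =>
      if PySem.Chars.len w_word ≥ w_del_len then
        w_ret ++ [PySem.List.pyRepeat MASK_CHAR.toList (PySem.Chars.len w_word)]
      else w_ret ++ [w_word]) []
  String.ofList (PySem.Chars.join " ".toList w_ret)

-- ===== PORT B =====
def proc_line_mask_long_word_alt (line : String) (lv : Int) (slv : Int) : String :=
  let words := PySem.Chars.splitOn line.toList " ".toList
  let lens := PySem.List.sorted (words.map PySem.Chars.len) (fun x => x) true
  let pos := lv - slv + 1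
  let pos := if pos < 0 then 0 else pos
  let w_del_len := if pos < PySem.List.len lens then PySem.List.pyGetD lens pos 0 else 0
  String.ofList (PySem.Chars.join " ".toList
    (words.map (fun w =>
      if PySem.Chars.len w ≥ w_del_len then PySem.List.pyRepeat MASK_CHAR.toList (PySem.Chars.len w)
      else w)))

-- ===== PRECONDITION & SPEC =====
def Spec_proc_line_mask_long_word (line : String) (lv : Int) (slv : Int) (out : String) : Prop := out = proc_line_mask_long_word_alt line lv slv
instance (line : String) (lv : Int) (slv : Int) (out : String) : Decidable (Spec_proc_line_mask_long_word line lv slv out) := by unfold Spec_proc_line_mask_long_word; infer_instance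

-- ===== CLAIM (what is proved, stated in full; the proofs are below) =====
def Claim_equal_proc_line_mask_long_word : Prop := ∀ (line : String) (lv : Int) (slv : Int), Dom_proc_line_mask_long_word line lv slv → Spec_proc_line_mask_long_word line lv slv (proc_line_mask_long_word line lv slv)

-- ===== LEMMAS AND PROOFS =====

-- deletion-threshold candidates: `t` occurs in `l` with at most c' elements strictly above it and
-- more than c' elements at-or-above it, or t = 0 and l has at most c' elements in total
def CharOf (l : List Int) (c' : Int) (t : Int) : Prop :=
  (t ∈ l ∧ ((l.countP (fun x => decide (t < x)) : Int) ≤ c' ∧ c' < (l.countP (fun x => decide (t ≤ x)) : Int)))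
  ∨ (t = 0 ∧ (l.length : Int) ≤ c')

-- A's break-loop, as a recursion (a = counter so far)
def findB (d : PySem.Dict Int Int) (c : Int) : List Int → Int → Int
  | [], _ => 0
  | k :: ks, a => if a + d.getD k 0 > c then k else findB d c ks (a + d.getD k 0)

lemma countP_split_eq (l : List Int) (p q : Int → Bool) (k : Int)
    (h : ∀ x ∈ l, p x = (q x || x == k)) (hq : q k = false) :
    l.countP p = l.countP q + l.count k := by
  induction l with
  | nil => simp
  | cons x xs ih =>
    have hx := h x (by simp)
    have hxs := ih (fun y hy => h y (by simp [hy]))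
    simp only [List.countP_cons, List.count_cons, hxs, hx]
    by_cases hk : x = k
    · subst hk
      simp [hq]
      omega
    · simp [hk]
      omega

lemma foldl_maskStepA_done (d : PySem.Dict Int Int) (c : Int) :
    ∀ (ks : List Int) (st : Int × Int × Bool), st.2.2 = true →
      ks.foldl (maskStepA d c) st = st := by
  intro ks
  induction ks with
  | nil => intro st _; rfl
  | cons k ks ih =>
    intro st h
    have hstep : maskStepA d c st k = st := by simp [maskStepA, h]
    rw [List.foldl_cons, hstep]
    exact ih st h

lemma foldl_maskStepA_eq_findB (d : PySem.Dict Int Int) (c : Int) :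
    ∀ (ks : List Int) (a : Int),
      (ks.foldl (maskStepA d c) (a, (0 : Int), false)).2.1 = findB d c ks a := by
  intro ks
  induction ks with
  | nil => intro a; rfl
  | cons k ks ih =>
    intro a
    rw [List.foldl_cons]
    by_cases hbr : a + d.getD k 0 > c
    · have hstep : maskStepA d c (a, (0 : Int), false) k = (a + d.getD k 0, k, true) := by
        simp [maskStepA, hbr]
      rw [hstep, foldl_maskStepA_done d c ks _ rfl]
      simp [findB, hbr]
    · have hstep : maskStepA d c (a, (0 : Int), false) k = (a + d.getD k 0, (0 : Int), false) := by
        simp [maskStepA, hbr]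
      rw [hstep, ih]
      simp [findB, hbr]

lemma findB_char (lens0 : List Int) (d : PySem.Dict Int Int) (c c' : Int)
    (hc' : c' = max c 0) :
    ∀ (ks : List Int) (a : Int),
      List.Pairwise (· > ·) ks →
      (∀ v ∈ ks, v ∈ lens0) →
      (∀ k ∈ ks, d.getD k 0 = (lens0.count k : Int)) →
      (∀ v ∈ lens0, v ∈ ks ∨ ∀ j ∈ ks, j < v) →
      a = (lens0.countP (fun x => decide (∀ j ∈ ks, j < x)) : Int) →
      a ≤ c' →
      CharOf lens0 c' (findB d c ks a) := by
  intro ks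
  induction ks with
  | nil =>
    intro a _ _ _ _ ha hac
    right
    refine ⟨rfl, ?_⟩
    have hcp : lens0.countP (fun x => decide (∀ j ∈ ([] : List Int), j < x)) = lens0.length := by
      simp
    rw [hcp] at ha
    omega
  | cons k ks ih =>
    intro a hpw h1 hcnt h3 ha hac
    have hk0 : k ∈ lens0 := h1 k (by simp)
    have hckpos : 0 < lens0.count k := List.count_pos_iff.mpr hk0
    have hgd : d.getD k 0 = (lens0.count k : Int) := hcnt k (by simp)
    have hlt : ∀ j ∈ ks, j < k := fun j hj => List.rel_of_pairwise_cons hpw hj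
    have ha0 : 0 ≤ a := by rw [ha]; exact Int.natCast_nonneg _
    have hsplit : lens0.countP (fun x => decide (∀ j ∈ ks, j < x))
        = lens0.countP (fun x => decide (∀ j ∈ k :: ks, j < x)) + lens0.count k := by
      apply countP_split_eq
      · intro x hx
        rw [Bool.eq_iff_iff]
        simp only [Bool.or_eq_true, decide_eq_true_eq, beq_iff_eq]
        constructor
        · intro hp
          by_cases hkx : k < x
          · refine Or.inl ?_
            intro j hj
            rcases List.mem_cons.mp hj with rfl | hj'
            · exact hkx
            · exact hp j hj'
          · right
            rcases h3 x hx with hmem | hbig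
            · rcases List.mem_cons.mp hmem with rfl | hmem'
              · rfl
              · exact absurd (hp x hmem') (lt_irrefl x)
            · exact absurd (hbig k (by simp)) hkx
        · rintro (hq | rfl)
          · exact fun j hj => hq j (by simp [hj])
          · exact hlt
      · simp
    by_cases hbr : a + d.getD k 0 > c
    · have hfb : findB d c (k :: ks) a = k := by simp [findB, hbr]
      rw [hfb]
      left
      have hco : lens0.countP (fun x => decide (k < x))
          = lens0.countP (fun x => decide (∀ j ∈ k :: ks, j < x)) := by
        apply List.countP_congr
        intro x hx
        simp only [decide_eq_true_eq]
        constructor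
        · intro hkx j hj
          rcases List.mem_cons.mp hj with rfl | hj'
          · exact hkx
          · exact lt_trans (hlt j hj') hkx
        · intro hall
          exact hall k (by simp)
      refine ⟨hk0, ?_, ?_⟩
      · rw [hco, ← ha]
        exact hac
      · have hge : lens0.countP (fun x => decide (k ≤ x))
            = lens0.countP (fun x => decide (k < x)) + lens0.count k := by
          apply countP_split_eq
          · intro x hx
            rw [Bool.eq_iff_iff]
            simp only [Bool.or_eq_true, decide_eq_true_eq, beq_iff_eq]
            constructor
            · intro hle
              rcases eq_or_lt_of_le hle with heq | hlt'
              · exact Or.inr heq.symm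
              · exact Or.inl hlt'
            · rintro (hlt' | rfl)
              · exact le_of_lt hlt'
              · exact le_refl x
          · simp
        have hco' : (lens0.countP (fun x => decide (k ≤ x)) : Int)
            = a + (lens0.count k : Int) := by
          rw [hge]
          push_cast
          rw [hco, ← ha]
        rw [hgd] at hbr
        omega
    · have hfb : findB d c (k :: ks) a = findB d c ks (a + d.getD k 0) := by
        simp [findB, hbr]
      rw [hfb]
      apply ih (a + d.getD k 0) hpw.of_cons (fun v hv => h1 v (by simp [hv]))
        (fun j hj => hcnt j (by simp [hj]))
      · intro v hv
        rcases h3 v hv with hmem | hbig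
        · rcases List.mem_cons.mp hmem with rfl | hm
          · exact Or.inr hlt
          · exact Or.inl hm
        · exact Or.inr (fun j hj => hbig j (by simp [hj]))
      · rw [hgd, ha, hsplit]
        push_cast
        ring
      · rw [hgd] at hbr ⊢
        omega

lemma countP_gt_getElem_le (L : List Int) (h : L.Pairwise (· ≥ ·)) (i : Nat) (hi : i < L.length) :
    L.countP (fun x => decide (L[i] < x)) ≤ i := by
  have hTD : L.countP (fun x => decide (L[i] < x))
      = (L.take i).countP (fun x => decide (L[i] < x)) + (L.drop i).countP (fun x => decide (L[i] < x)) := by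
    rw [← List.countP_append, List.take_append_drop]
  have hdrop : (L.drop i).countP (fun x => decide (L[i] < x)) = 0 := by
    rw [List.countP_eq_zero]
    intro x hx
    obtain ⟨j, hj, rfl⟩ := List.mem_iff_getElem.mp hx
    have hlen' : i + j < L.length := by
      rw [List.length_drop] at hj
      omega
    rw [List.getElem_drop]
    simp only [decide_eq_true_eq, not_lt]
    rcases Nat.eq_zero_or_pos j with rfl | hj0
    · simp
    · exact List.pairwise_iff_getElem.mp h i (i + j) hi hlen' (by omega)
  have htake : (L.take i).countP (fun x => decide (L[i] < x)) ≤ i := by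
    calc (L.take i).countP (fun x => decide (L[i] < x)) ≤ (L.take i).length :=
          List.countP_le_length
      _ ≤ i := by simp [List.length_take]
  omega

lemma lt_countP_ge_getElem (L : List Int) (h : L.Pairwise (· ≥ ·)) (i : Nat) (hi : i < L.length) :
    i < L.countP (fun x => decide (L[i] ≤ x)) := by
  have hTD : L.countP (fun x => decide (L[i] ≤ x))
      = (L.take (i + 1)).countP (fun x => decide (L[i] ≤ x))
        + (L.drop (i + 1)).countP (fun x => decide (L[i] ≤ x)) := by
    rw [← List.countP_append, List.take_append_drop]
  have hlen : (L.take (i + 1)).length = i + 1 := by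
    rw [List.length_take]
    omega
  have htake : (L.take (i + 1)).countP (fun x => decide (L[i] ≤ x)) = i + 1 := by
    have hall : ∀ x ∈ L.take (i + 1), decide (L[i] ≤ x) = true := by
      intro x hx
      obtain ⟨j, hj, rfl⟩ := List.mem_iff_getElem.mp hx
      have hj' : j < i + 1 := by rw [hlen] at hj; exact hj
      rw [List.getElem_take]
      simp only [decide_eq_true_eq]
      rcases Nat.lt_or_ge j i with hji | hji
      · exact List.pairwise_iff_getElem.mp h j i (by omega) hi hji
      · have hji' : j = i := by omega
        subst hji'
        exact le_refl _
    have := List.countP_eq_length.mpr hall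
    rw [hlen] at this
    exact this
  omega

lemma charOf_unique (l : List Int) (c' : Int) (t1 t2 : Int)
    (h1 : CharOf l c' t1) (h2 : CharOf l c' t2) : t1 = t2 := by
  have hlen1 : l.countP (fun x => decide (t1 ≤ x)) ≤ l.length := List.countP_le_length
  have hlen2 : l.countP (fun x => decide (t2 ≤ x)) ≤ l.length := List.countP_le_length
  rcases h1 with ⟨hm1, hle1, hlt1⟩ | ⟨rfl, hl1⟩ <;> rcases h2 with ⟨hm2, hle2, hlt2⟩ | ⟨rfl, hl2⟩
  · rcases lt_trichotomy t1 t2 with hlt | heq | hgt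
    · have hmono : l.countP (fun x => decide (t2 ≤ x)) ≤ l.countP (fun x => decide (t1 < x)) := by
        apply List.countP_mono_left
        intro x _ hx
        simp only [decide_eq_true_eq] at hx ⊢
        omega
      omega
    · exact heq
    · have hmono : l.countP (fun x => decide (t1 ≤ x)) ≤ l.countP (fun x => decide (t2 < x)) := by
        apply List.countP_mono_left
        intro x _ hx
        simp only [decide_eq_true_eq] at hx ⊢
        omega
      omega
  · omega
  · omega
  · rfl

lemma dict_step_collapse (d : PySem.Dict Int Int) (k : Int) :
    (if d.contains k = false then d.insert k 0 else d).insert k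
      ((if d.contains k = false then d.insert k 0 else d).getD k 0 + 1)
    = d.insert k (d.getD k 0 + 1) := by
  by_cases hck : d.contains k = false
  · rw [if_pos hck, PySem.Dict.getD_insert_self, PySem.Dict.insert_insert_self,
      PySem.Dict.getD_of_not_contains d 0 hck]
  · rw [if_neg hck]

lemma make_len_dict_eq (line : String) :
    make_len_dict line
      = PySem.Dict.counter ((PySem.Chars.splitOn line.toList " ".toList).map PySem.Chars.len) := by
  unfold make_len_dict
  rw [← PySem.Dict.foldl_insert_getD_add_one_eq_counter, List.foldl_map]
  congr 1
  funext d w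
  exact dict_step_collapse d (PySem.Chars.len w)

lemma threshold_main (lens0 : List Int) (c : Int) :
    ((PySem.List.sorted (PySem.Dict.counter lens0).keys (fun x => x) true).foldl
        (maskStepA (PySem.Dict.counter lens0) c) ((0 : Int), (0 : Int), false)).2.1
      = (if (if c < 0 then 0 else c) < PySem.List.len (PySem.List.sorted lens0 (fun x => x) true)
          then PySem.List.pyGetD (PySem.List.sorted lens0 (fun x => x) true) (if c < 0 then 0 else c) 0
          else 0) := by
  set ks := PySem.List.sorted (PySem.Dict.counter lens0).keys (fun x => x) true with hks
  set L := PySem.List.sorted lens0 (fun x => x) true with hL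
  set c' := if c < 0 then 0 else c with hc'
  have hc'max : c' = max c 0 := by rw [hc']; split <;> omega
  have hperm : ks.Perm (PySem.Dict.counter lens0).keys := PySem.List.sorted_perm _ _ _
  have hLperm : L.Perm lens0 := PySem.List.sorted_perm _ _ _
  have hksmem : ∀ v, v ∈ ks ↔ v ∈ lens0 := by
    intro v
    rw [hperm.mem_iff, PySem.Dict.keys_counter, PySem.Set.mem_ofList]
  have hnd : ks.Nodup := hperm.nodup_iff.mpr (PySem.Dict.nodup_keys_counter lens0)
  have hge : ks.Pairwise (fun a b => b ≤ a) := PySem.List.sorted_pairwise_rev _ _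
  have hgt : ks.Pairwise (· > ·) :=
    List.Pairwise.imp (fun hab => lt_of_le_of_ne hab.1 (Ne.symm hab.2)) (hge.and hnd)
  rw [foldl_maskStepA_eq_findB]
  have hA : CharOf lens0 c' (findB (PySem.Dict.counter lens0) c ks 0) := by
    apply findB_char lens0 _ c c' hc'max ks 0 hgt (fun v hv => (hksmem v).mp hv)
      (fun k _ => PySem.Dict.getD_counter lens0 k)
      (fun v hv => Or.inl ((hksmem v).mpr hv))
    · have hz : lens0.countP (fun x => decide (∀ j ∈ ks, j < x)) = 0 := by
        rw [List.countP_eq_zero]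
        intro x hx
        simp only [decide_eq_true_eq, not_forall]
        exact ⟨x, (hksmem x).mpr hx, lt_irrefl x⟩
      rw [hz]
      rfl
    · omega
  have hgeL : L.Pairwise (· ≥ ·) := PySem.List.sorted_pairwise_rev _ _
  have hB : CharOf lens0 c' (if c' < PySem.List.len L then PySem.List.pyGetD L c' 0 else 0) := by
    by_cases hlen : c' < PySem.List.len L
    · rw [if_pos hlen]
      have hc0 : 0 ≤ c' := by omega
      rw [PySem.List.len_eq] at hlen
      have hiL : c'.toNat < L.length := by omega
      have hpg : PySem.List.pyGetD L c' 0 = L[c'.toNat] :=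
        PySem.List.pyGetD_eq_getElem L 0 hc0 hlen
      rw [hpg]
      left
      refine ⟨hLperm.mem_iff.mp (List.getElem_mem _), ?_, ?_⟩
      · have hcc := countP_gt_getElem_le L hgeL c'.toNat hiL
        rw [hLperm.countP_eq] at hcc
        omega
      · have hcc := lt_countP_ge_getElem L hgeL c'.toNat hiL
        rw [hLperm.countP_eq] at hcc
        omega
    · rw [if_neg hlen]
      right
      refine ⟨rfl, ?_⟩
      rw [PySem.List.len_eq, hLperm.length_eq] at hlen
      omega
  exact charOf_unique lens0 c' _ _ hA hB

lemma mask_fold (t : Int) (ws : List (List Char)) :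
    ws.foldl
      (fun w_ret w_word =>
        if PySem.Chars.len w_word ≥ t then
          w_ret ++ [PySem.List.pyRepeat MASK_CHAR.toList (PySem.Chars.len w_word)]
        else w_ret ++ [w_word]) []
      = ws.map (fun w =>
          if PySem.Chars.len w ≥ t then PySem.List.pyRepeat MASK_CHAR.toList (PySem.Chars.len w)
          else w) := by
  have hstep : (fun (w_ret : List (List Char)) (w_word : List Char) =>
        if PySem.Chars.len w_word ≥ t then
          w_ret ++ [PySem.List.pyRepeat MASK_CHAR.toList (PySem.Chars.len w_word)]
        else w_ret ++ [w_word])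
      = (fun w_ret w_word => w_ret ++
          [if PySem.Chars.len w_word ≥ t then PySem.List.pyRepeat MASK_CHAR.toList (PySem.Chars.len w_word)
           else w_word]) := by
    funext acc w
    by_cases hc : t ≤ (w.length : Int)
    · simp only [PySem.Chars.len, ge_iff_le, if_pos hc]
    · simp only [PySem.Chars.len, ge_iff_le, if_neg hc]
  rw [hstep, PySem.List.foldl_append_singleton_eq_map]
  simp

-- ===== VERDICT (by name: the statement is the Claim_ definition above) =====
theorem proc_line_mask_long_word_spec : Claim_equal_proc_line_mask_long_word := by
  intro line lv slv _
  show proc_line_mask_long_word line lv slv = proc_line_mask_long_word_alt line lv slv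
  simp only [proc_line_mask_long_word, proc_line_mask_long_word_alt, make_len_dict_eq]
  rw [threshold_main, mask_fold]
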